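-- pv_equiv track=rewrite | github.com/VitorAndradeLopes/Calculadora-WEB | lista8vitorlopes.py | Questao3
-- ===== SOURCE A (Python) =====
-- def Questao3(L_NomeAlunos, L_NotaAlunos):
--     D_AlunoNota = {}
--     MudarNota = False
--     Count = 0
--     Nota = 0
--     for Nome in L_NomeAlunos:
--         for D_Nome in D_AlunoNota:
--             if D_Nome == Nome:
--                 Nota = L_NotaAlunos[Count]
--                 if Nota > D_AlunoNota[Nome]:
--                     MudarNota = True
--         if Nome not in D_AlunoNota:
--             D_AlunoNota[Nome] = L_NotaAlunos[Count]
--         if MudarNota == True: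
--             MudarNota = False
--             D_AlunoNota[Nome] = Nota
--         Count += 1
--     return D_AlunoNota
-- ===== SOURCE B (Python) =====
-- def Questao3(L_NomeAlunos, L_NotaAlunos):
--     # Group all notes per name (index access so a too-short note list raises
--     # IndexError exactly like the original), then take each group's max.
--     groups = {}
--     for i, nome in enumerate(L_NomeAlunos):
--         groups.setdefault(nome, []).append(L_NotaAlunos[i])
--     return {nome: max(notas) for nome, notas in groups.items()}
-- ===== Notes on version B (the rewrite author's own statement) =====
-- stated objective: faster
-- what changed: Replaces the linear scan of the dict's keys inside the outer loop (running-max with MudarNota/Nota flags) by a two-pass group-then-max: one dict of note-lists built with setdefault/append, then a comprehension taking max of each group.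
import Mathlib
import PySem

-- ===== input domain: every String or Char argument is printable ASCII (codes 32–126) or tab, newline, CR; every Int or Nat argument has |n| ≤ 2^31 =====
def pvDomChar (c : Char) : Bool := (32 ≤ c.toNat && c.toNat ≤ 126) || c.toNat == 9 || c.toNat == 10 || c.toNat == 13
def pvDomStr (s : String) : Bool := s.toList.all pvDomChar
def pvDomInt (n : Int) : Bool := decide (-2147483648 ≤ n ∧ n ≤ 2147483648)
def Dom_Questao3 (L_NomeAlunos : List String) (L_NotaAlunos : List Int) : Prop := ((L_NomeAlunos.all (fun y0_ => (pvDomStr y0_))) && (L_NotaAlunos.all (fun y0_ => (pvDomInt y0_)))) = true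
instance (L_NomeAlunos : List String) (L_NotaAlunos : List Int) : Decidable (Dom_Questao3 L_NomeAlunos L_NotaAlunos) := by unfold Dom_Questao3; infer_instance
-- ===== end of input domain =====

-- B replaces A's per-name scan over the dict's keys (running max with flags) by
-- group-all-notes-per-name then max of each group: asymptotically faster.


-- ===== PORT A =====
-- literal port of A: state (dict, MudarNota, Count, Nota); the inner
-- 'for D_Nome in D_AlunoNota' is a fold over the dict's keys; L_NotaAlunos[Count]
-- is pyGetD (Count is in range under Pre_); D_AlunoNota[Nome] inside the inner
-- loop is getD (the key Nome is present exactly there, so the default is unread).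
def Questao3 (L_NomeAlunos : List String) (L_NotaAlunos : List Int) : List (String × Int) :=
  let fin := L_NomeAlunos.foldl
    (fun (st : PySem.Dict String Int × Bool × Int × Int) Nome =>
      let d := st.1
      let mudar := st.2.1
      let count := st.2.2.1
      let nota := st.2.2.2
      let inner := d.keys.foldl
        (fun (mn : Bool × Int) D_Nome =>
          if D_Nome == Nome then
            (if PySem.List.pyGetD L_NotaAlunos count 0 > d.getD Nome 0 then true else mn.1,
             PySem.List.pyGetD L_NotaAlunos count 0)
          else mn)
        (mudar, nota)
      let d1 := if d.contains Nome = false then d.insert Nome (PySem.List.pyGetD L_NotaAlunos count 0) else d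
      let mudar2 := if inner.1 = true then false else inner.1
      let d2 := if inner.1 = true then d1.insert Nome inner.2 else d1
      (d2, mudar2, count + 1, inner.2))
    (PySem.Dict.empty, false, 0, 0)
  fin.1.items

-- ===== PORT B =====
-- port of Source B: groups.setdefault(nome, []).append(L_NotaAlunos[i]) is Dict.modify;
-- max(notas) is PySem.List.max? with identity key (every group is nonempty, so exact).
def Questao3_alt (L_NomeAlunos : List String) (L_NotaAlunos : List Int) : List (String × Int) :=
  let groups := (PySem.List.enumerate L_NomeAlunos).foldl
    (fun (g : PySem.Dict String (List Int)) p =>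
      g.modify p.2 [] (fun l => l ++ [PySem.List.pyGetD L_NotaAlunos p.1 0]))
    PySem.Dict.empty
  groups.items.map (fun p => (p.1, (PySem.List.max? p.2 (fun y => y)).getD 0))

-- ===== PRECONDITION & SPEC =====
-- Pre_ excludes exactly the inputs on which Python A raises IndexError
-- (more names than notes; both A and B index the note list at every name's position).
def Pre_Questao3 (L_NomeAlunos : List String) (L_NotaAlunos : List Int) : Prop :=
  L_NomeAlunos.length ≤ L_NotaAlunos.length
instance (L_NomeAlunos : List String) (L_NotaAlunos : List Int) : Decidable (Pre_Questao3 L_NomeAlunos L_NotaAlunos) := by unfold Pre_Questao3; infer_instance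
def pvWitness_Questao3 : List String × List Int := (["ana", "bia", "ana"], [3, 5, 7])

def Spec_Questao3 (L_NomeAlunos : List String) (L_NotaAlunos : List Int) (out : List (String × Int)) : Prop := out = Questao3_alt L_NomeAlunos L_NotaAlunos
instance (L_NomeAlunos : List String) (L_NotaAlunos : List Int) (out : List (String × Int)) : Decidable (Spec_Questao3 L_NomeAlunos L_NotaAlunos out) := by unfold Spec_Questao3; infer_instance

-- ===== CLAIM (what is proved, stated in full; the proofs are below) =====
def Claim_equal_Questao3 : Prop := ∀ (L_NomeAlunos : List String) (L_NotaAlunos : List Int), Dom_Questao3 L_NomeAlunos L_NotaAlunos → Pre_Questao3 L_NomeAlunos L_NotaAlunos → Spec_Questao3 L_NomeAlunos L_NotaAlunos (Questao3 L_NomeAlunos L_NotaAlunos)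

-- ===== LEMMAS AND PROOFS =====

-- the outer-loop body of port A, named so the invariant lemma can speak about it
def pvStepA (L_NotaAlunos : List Int) (st : PySem.Dict String Int × Bool × Int × Int) (Nome : String) :
    PySem.Dict String Int × Bool × Int × Int :=
  let d := st.1
  let mudar := st.2.1
  let count := st.2.2.1
  let nota := st.2.2.2
  let inner := d.keys.foldl
    (fun (mn : Bool × Int) D_Nome =>
      if D_Nome == Nome then
        (if PySem.List.pyGetD L_NotaAlunos count 0 > d.getD Nome 0 then true else mn.1,
         PySem.List.pyGetD L_NotaAlunos count 0)
      else mn)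
    (mudar, nota)
  let d1 := if d.contains Nome = false then d.insert Nome (PySem.List.pyGetD L_NotaAlunos count 0) else d
  let mudar2 := if inner.1 = true then false else inner.1
  let d2 := if inner.1 = true then d1.insert Nome inner.2 else d1
  (d2, mudar2, count + 1, inner.2)

-- the grouping-loop body of port B
def pvStepB (L_NotaAlunos : List Int) (g : PySem.Dict String (List Int)) (p : Int × String) :
    PySem.Dict String (List Int) :=
  g.modify p.2 [] (fun l => l ++ [PySem.List.pyGetD L_NotaAlunos p.1 0])

-- B's per-group maximum, as the port computes it
def pvMx (l : List Int) : Int := (PySem.List.max? l (fun y => y)).getD 0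

lemma questao3_eq (L_NomeAlunos : List String) (L_NotaAlunos : List Int) :
    Questao3 L_NomeAlunos L_NotaAlunos
      = (L_NomeAlunos.foldl (pvStepA L_NotaAlunos) (PySem.Dict.empty, false, 0, 0)).1.items := rfl

lemma questao3_alt_eq (L_NomeAlunos : List String) (L_NotaAlunos : List Int) :
    Questao3_alt L_NomeAlunos L_NotaAlunos
      = ((PySem.List.enumerate L_NomeAlunos).foldl (pvStepB L_NotaAlunos) PySem.Dict.empty).items.map
          (fun p => (p.1, pvMx p.2)) := rfl

lemma pvMx_singleton (v : Int) : pvMx [v] = v := by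
  simp [pvMx, PySem.List.max?_id_cons]

-- Python's max over a nonempty list, extended by one element on the right
lemma pvMx_append (l : List Int) (v : Int) (hl : l ≠ []) :
    pvMx (l ++ [v]) = if v > pvMx l then v else pvMx l := by
  obtain ⟨x, xs, rfl⟩ := List.exists_cons_of_ne_nil hl
  simp only [pvMx, List.cons_append, PySem.List.max?_id_cons, Option.getD_some,
    List.foldl_append, List.foldl_cons, List.foldl_nil]
  by_cases h : v > List.foldl max x xs
  · rw [if_pos h, max_eq_right (le_of_lt h)]
  · rw [if_neg h, max_eq_left (by omega)]

-- the inner 'for D_Nome in D_AlunoNota' loop of A, characterised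
lemma pvInner (Nome : String) (v m : Int) (ks : List String) (b : Bool) (nota : Int) :
    ks.foldl
      (fun (mn : Bool × Int) D_Nome =>
        if D_Nome == Nome then (if v > m then true else mn.1, v) else mn) (b, nota)
    = if Nome ∈ ks then (b || decide (v > m), v) else (b, nota) := by
  induction ks generalizing b nota with
  | nil => simp
  | cons k ks ih =>
      simp only [List.foldl_cons]
      by_cases hk : k = Nome
      · subst hk
        rw [show ((if (k == k) then ((if v > m then true else b), v) else (b, nota)) : Bool × Int)
              = ((b || decide (v > m)), v) from by by_cases h : v > m <;> simp [h]]
        rw [ih]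
        by_cases hmem : k ∈ ks
        · simp [hmem]
        · simp [hmem]
      · rw [show ((if (k == Nome) then ((if v > m then true else b), v) else (b, nota)) : Bool × Int)
              = (b, nota) from by simp [hk]]
        rw [ih]
        simp [List.mem_cons, Ne.symm hk]

-- uniqueness of a key's value in a nodup-keyed dict
lemma pv_val_unique {ν : Type} (g : PySem.Dict String ν) (hnd : g.keys.Nodup)
    {k : String} {l : ν} (hkl : (k, l) ∈ g.items) {p : String × ν} (hp : p ∈ g.items)
    (hk : p.1 = k) : p.2 = l := by
  have h1 := PySem.Dict.get?_of_mem_items g hkl hnd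
  have h2 := PySem.Dict.get?_of_mem_items g (k := p.1) (v := p.2) (by simpa using hp) hnd
  rw [hk, h1] at h2
  exact Option.some_inj.mp h2.symm

-- keys agree under the items relation
lemma pv_keys_eq (d : PySem.Dict String Int) (g : PySem.Dict String (List Int))
    (h : d.items = g.items.map (fun p => (p.1, pvMx p.2))) : d.keys = g.keys := by
  simp only [PySem.Dict.keys, h, List.map_map]
  rfl

-- MAIN INVARIANT: A's dict is B's group dict with each group replaced by its max
lemma pv_main (L_NotaAlunos : List Int) (names : List String) :
    ∀ (c : Int) (nota : Int) (d : PySem.Dict String Int) (g : PySem.Dict String (List Int)),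
      g.keys.Nodup →
      d.items = g.items.map (fun p => (p.1, pvMx p.2)) →
      (∀ p ∈ g.items, p.2 ≠ []) →
      (names.foldl (pvStepA L_NotaAlunos) (d, false, c, nota)).1.items
        = ((PySem.List.enumerate names c).foldl (pvStepB L_NotaAlunos) g).items.map
            (fun p => (p.1, pvMx p.2)) := by
  induction names with
  | nil =>
      intro c nota d g _ hitems _
      simpa [PySem.List.enumerate_nil] using hitems
  | cons Nome names ih =>
      intro c nota d g hnd hitems hne
      rw [PySem.List.enumerate_cons, List.foldl_cons, List.foldl_cons]
      have hkeys : d.keys = g.keys := pv_keys_eq d g hitems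
      have hndd : d.keys.Nodup := by rw [hkeys]; exact hnd
      set v := PySem.List.pyGetD L_NotaAlunos c 0 with hv
      by_cases hmem : Nome ∈ g.keys
      · -- the name was seen before
        have hmemd : Nome ∈ d.keys := by rw [hkeys]; exact hmem
        obtain ⟨p, hp, hp1⟩ := List.mem_map.mp hmem
        have hpl : (Nome, p.2) ∈ g.items := by rw [← hp1]; exact hp
        set l := p.2 with hldef
        have hlne : l ≠ [] := hne p hp
        have hdm : d.getD Nome 0 = pvMx l := by
          apply PySem.Dict.getD_of_mem_items d _ hndd
          rw [hitems]
          exact List.mem_map_of_mem hpl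
        have hgl : g.getD Nome [] = l := PySem.Dict.getD_of_mem_items g hpl hnd []
        have hcd : d.contains Nome = true := (PySem.Dict.contains_iff_mem_keys d Nome).mpr hmemd
        have hcg : g.contains Nome = true := (PySem.Dict.contains_iff_mem_keys g Nome).mpr hmem
        have hstepB : pvStepB L_NotaAlunos g (c, Nome) = g.insert Nome (l ++ [v]) := by
          simp only [pvStepB, PySem.Dict.modify, hgl, hv]
        have hstepA : pvStepA L_NotaAlunos (d, false, c, nota) Nome
            = ((if v > pvMx l then d.insert Nome v else d), false, c + 1, v) := by
          simp only [pvStepA]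
          rw [pvInner Nome v (d.getD Nome 0) d.keys false nota, if_pos hmemd]
          simp only [Bool.false_or, hcd, hdm]
          by_cases hgt : v > pvMx l
          · simp [hgt]
          · simp [hgt]
        rw [hstepA, hstepB]
        have hnd' : (g.insert Nome (l ++ [v])).keys.Nodup :=
          PySem.Dict.nodup_keys_insert g Nome (l ++ [v]) hnd
        have hne' : ∀ q ∈ (g.insert Nome (l ++ [v])).items, q.2 ≠ [] := by
          intro q hq
          rcases (PySem.Dict.mem_items_insert g Nome (l ++ [v]) q).mp hq with hq1 | ⟨hq2, _⟩
          · rw [hq1]; simp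
          · exact hne q hq2
        have hitems' : (if v > pvMx l then d.insert Nome v else d).items
            = ((g.insert Nome (l ++ [v])).items).map (fun p => (p.1, pvMx p.2)) := by
          rw [PySem.Dict.items_insert_of_contains g (k := Nome) (l ++ [v]) hcg, List.map_map]
          by_cases hgt : v > pvMx l
          · rw [if_pos hgt, PySem.Dict.items_insert_of_contains d (k := Nome) v hcd, hitems,
              List.map_map]
            apply List.map_congr_left
            intro q hq
            by_cases hq1 : q.1 = Nome
            · simp only [Function.comp_apply, hq1, BEq.rfl, if_pos, pvMx_append l v hlne,
                if_pos hgt]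
            · simp only [Function.comp_apply, beq_iff_eq, hq1, if_false]
          · rw [if_neg hgt, hitems]
            apply List.map_congr_left
            intro q hq
            by_cases hq1 : q.1 = Nome
            · have hq2 : q.2 = l := pv_val_unique g hnd hpl hq hq1
              simp only [Function.comp_apply, beq_iff_eq, hq1, if_true,
                pvMx_append l v hlne, if_neg hgt, hq2]
            · simp only [Function.comp_apply, beq_iff_eq, hq1, if_false]
        exact ih (c + 1) v _ _ hnd' hitems' hne'
      · -- a fresh name
        have hmemd : Nome ∉ d.keys := by rw [hkeys]; exact hmem
        have hcd : d.contains Nome = false := by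
          have := mt (PySem.Dict.contains_iff_mem_keys d Nome).mp hmemd
          simpa using this
        have hcg : g.contains Nome = false := by
          have := mt (PySem.Dict.contains_iff_mem_keys g Nome).mp hmem
          simpa using this
        have hstepB : pvStepB L_NotaAlunos g (c, Nome) = g.insert Nome [v] := by
          simp only [pvStepB, PySem.Dict.modify, PySem.Dict.getD_of_not_contains g [] hcg,
            List.nil_append, hv]
        have hstepA : pvStepA L_NotaAlunos (d, false, c, nota) Nome
            = (d.insert Nome v, false, c + 1, nota) := by
          simp only [pvStepA]
          rw [pvInner Nome v (d.getD Nome 0) d.keys false nota, if_neg hmemd]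
          simp [hcd, ← hv]
        rw [hstepA, hstepB]
        have hnd' : (g.insert Nome [v]).keys.Nodup :=
          PySem.Dict.nodup_keys_insert g Nome [v] hnd
        have hne' : ∀ q ∈ (g.insert Nome [v]).items, q.2 ≠ [] := by
          intro q hq
          rcases (PySem.Dict.mem_items_insert g Nome [v] q).mp hq with hq1 | ⟨hq2, _⟩
          · rw [hq1]; simp
          · exact hne q hq2
        have hitems' : (d.insert Nome v).items
            = ((g.insert Nome [v]).items).map (fun p => (p.1, pvMx p.2)) := by
          rw [PySem.Dict.items_insert_of_not_contains d v hcd,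
            PySem.Dict.items_insert_of_not_contains g [v] hcg, List.map_append, hitems]
          simp [pvMx_singleton]
        exact ih (c + 1) nota _ _ hnd' hitems' hne'

-- ===== VERDICT (by name: the statement is the Claim_ definition above) =====
theorem Questao3_spec : Claim_equal_Questao3 := by
  intro names notes _ _
  show Questao3 names notes = Questao3_alt names notes
  rw [questao3_eq, questao3_alt_eq]
  exact pv_main notes names 0 0 PySem.Dict.empty PySem.Dict.empty (by simp) (by rfl)
    (by simp [PySem.Dict.empty])
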